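-- pv_equiv track=rewrite | github.com/QI1002/exampool | Leetcode/363.py | maxSumSubRect2
-- ===== SOURCE A (Python) =====
-- def maxSumSubRect2(matrix, k):
--     rowc = len(matrix)
--     colc = len(matrix[0])
--     maxi = maxk = None
--
--     for y1 in range(rowc):
--         for x1 in range(colc):
--             for y2 in range(y1+1):
--                 for x2 in range(x1+1):
--                     sum = 0
--                     for h in range(y2, y1+1, 1):
--                         for w in range (x2, x1+1, 1):
--                             sum += matrix[h][w]
--                     if (sum <= k):
--                         if (maxk == None or sum > maxk):
--                             maxk = sum
--                             maxi = ((y1,x1),(y2,x2))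
--     return maxk, maxi
-- ===== SOURCE B (Python) =====
-- def maxSumSubRect2(matrix, k):
--     rowc = len(matrix)
--     colc = len(matrix[0])
--     # 2D prefix-sum table: pre[y][x] = sum of matrix[h][w] for h < y, w < x
--     prev = [0] * (colc + 1)
--     pre = [prev]
--     for row in matrix:
--         cur = [0]
--         s = 0
--         for j in range(colc):
--             s += row[j]
--             cur.append(prev[j + 1] + s)
--         pre.append(cur)
--         prev = cur
--     maxi = maxk = None
--     for y1 in range(rowc):
--         for x1 in range(colc):
--             for y2 in range(y1 + 1):
--                 for x2 in range(x1 + 1):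
--                     s = pre[y1 + 1][x1 + 1] - pre[y2][x1 + 1] - pre[y1 + 1][x2] + pre[y2][x2]
--                     if s <= k:
--                         if maxk is None or s > maxk:
--                             maxk = s
--                             maxi = ((y1, x1), (y2, x2))
--     return maxk, maxi
-- ===== Notes on version B (the rewrite author's own statement) =====
-- stated objective: faster
-- what changed: B precomputes a 2D prefix-sum table once so every rectangle sum is four table lookups instead of A's two nested summation loops, keeping A's exact iteration and tie-breaking order.
import Mathlib
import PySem

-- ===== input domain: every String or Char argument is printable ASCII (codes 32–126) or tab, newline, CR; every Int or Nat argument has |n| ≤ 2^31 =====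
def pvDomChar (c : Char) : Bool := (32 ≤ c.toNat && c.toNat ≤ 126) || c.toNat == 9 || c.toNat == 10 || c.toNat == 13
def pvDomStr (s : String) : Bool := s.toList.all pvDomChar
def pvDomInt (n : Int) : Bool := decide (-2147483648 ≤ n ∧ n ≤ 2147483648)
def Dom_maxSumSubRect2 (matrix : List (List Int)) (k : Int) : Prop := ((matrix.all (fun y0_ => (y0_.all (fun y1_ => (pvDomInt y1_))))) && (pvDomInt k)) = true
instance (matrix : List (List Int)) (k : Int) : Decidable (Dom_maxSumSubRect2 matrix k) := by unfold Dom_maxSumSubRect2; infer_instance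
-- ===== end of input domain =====

-- B replaces A's two innermost summation loops by a 2D prefix-sum table built once,
-- so each rectangle sum is four table lookups (objective: faster; same iteration and
-- tie-breaking order as A, so the returned (maxk, maxi) pair is identical).

-- ===== PORT A =====
def maxSumSubRect2 (matrix : List (List Int)) (k : Int) : Option Int × (Option ((Int × Int) × (Int × Int))) :=
  let rowc : Int := matrix.length
  let colc : Int := (PySem.List.pyGetD matrix 0 []).length
  (PySem.List.pyRange 0 rowc).foldl (fun st y1 =>
    (PySem.List.pyRange 0 colc).foldl (fun st x1 =>
      (PySem.List.pyRange 0 (y1 + 1)).foldl (fun st y2 =>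
        (PySem.List.pyRange 0 (x1 + 1)).foldl (fun st x2 =>
          let s : Int := (PySem.List.pyRange y2 (y1 + 1)).foldl (fun s h =>
            (PySem.List.pyRange x2 (x1 + 1)).foldl (fun s w =>
              s + PySem.List.pyGetD (PySem.List.pyGetD matrix h []) w 0) s) 0
          if s ≤ k then
            match st.1 with
            | none => (some s, some ((y1, x1), (y2, x2)))
            | some mk => if s > mk then (some s, some ((y1, x1), (y2, x2))) else st
          else st) st) st) st) ((none : Option Int), (none : Option ((Int × Int) × (Int × Int))))

-- ===== PORT B =====
-- B-side helper: pre[y][x]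
def pvIdx2 (pre : List (List Int)) (y x : Int) : Int :=
  PySem.List.pyGetD (PySem.List.pyGetD pre y []) x 0

-- B-side helper: builds the 2D prefix-sum table (state = (pre, prev) of Source B's loop)
def pvBuildPre (matrix : List (List Int)) (colc : Int) : List (List Int) × List Int :=
  matrix.foldl (fun st row =>
    let cur := (PySem.List.pyRange 0 colc).foldl (fun cs j =>
      let s := cs.2 + PySem.List.pyGetD row j 0
      (cs.1 ++ [PySem.List.pyGetD st.2 (j + 1) 0 + s], s)) ([(0 : Int)], (0 : Int))
    (st.1 ++ [cur.1], cur.1))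
    ([List.replicate (colc + 1).toNat (0 : Int)], List.replicate (colc + 1).toNat (0 : Int))

def maxSumSubRect2_alt (matrix : List (List Int)) (k : Int) : Option Int × (Option ((Int × Int) × (Int × Int))) :=
  let rowc : Int := matrix.length
  let colc : Int := (PySem.List.pyGetD matrix 0 []).length
  let pre := (pvBuildPre matrix colc).1
  (PySem.List.pyRange 0 rowc).foldl (fun st y1 =>
    (PySem.List.pyRange 0 colc).foldl (fun st x1 =>
      (PySem.List.pyRange 0 (y1 + 1)).foldl (fun st y2 =>
        (PySem.List.pyRange 0 (x1 + 1)).foldl (fun st x2 =>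
          let s : Int := pvIdx2 pre (y1 + 1) (x1 + 1) - pvIdx2 pre y2 (x1 + 1)
                          - pvIdx2 pre (y1 + 1) x2 + pvIdx2 pre y2 x2
          if s ≤ k then
            match st.1 with
            | none => (some s, some ((y1, x1), (y2, x2)))
            | some mk => if s > mk then (some s, some ((y1, x1), (y2, x2))) else st
          else st) st) st) st) ((none : Option Int), (none : Option ((Int × Int) × (Int × Int))))

-- ===== PRECONDITION & SPEC =====
-- Python A raises IndexError on an empty matrix (matrix[0]) and on any row shorter than
-- the first row (matrix[h][w] with w < len(matrix[0])); exactly those inputs are excluded.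
def Pre_maxSumSubRect2 (matrix : List (List Int)) (k : Int) : Prop :=
  matrix ≠ [] ∧ ∀ row ∈ matrix, (matrix.headD []).length ≤ row.length
instance (matrix : List (List Int)) (k : Int) : Decidable (Pre_maxSumSubRect2 matrix k) := by
  unfold Pre_maxSumSubRect2; infer_instance

def pvWitness_maxSumSubRect2 : List (List Int) × Int := ([[1, -2], [3, 4]], 5)

def Spec_maxSumSubRect2 (matrix : List (List Int)) (k : Int) (out : Option Int × (Option ((Int × Int) × (Int × Int)))) : Prop := out = maxSumSubRect2_alt matrix k
instance (matrix : List (List Int)) (k : Int) (out : Option Int × (Option ((Int × Int) × (Int × Int)))) : Decidable (Spec_maxSumSubRect2 matrix k out) := by unfold Spec_maxSumSubRect2; infer_instance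

-- ===== CLAIM (what is proved, stated in full; the proofs are below) =====
def Claim_equal_maxSumSubRect2 : Prop := ∀ (matrix : List (List Int)) (k : Int), Dom_maxSumSubRect2 matrix k → Pre_maxSumSubRect2 matrix k → Spec_maxSumSubRect2 matrix k (maxSumSubRect2 matrix k)

-- ===== LEMMAS AND PROOFS =====

-- row prefix sum: sum of row[0..t)
def pvRowPref (row : List Int) (t : Nat) : Int :=
  ∑ w ∈ Finset.range t, PySem.List.pyGetD row (↑w) 0

-- 2D prefix sum: sum of matrix[h][w] for h < y, w < x (out-of-range cells read as 0)
def pvS (m : List (List Int)) (y x : Nat) : Int :=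
  ∑ h ∈ Finset.range y, pvRowPref (PySem.List.pyGetD m (↑h) []) x

lemma pv_sum_map_range_int (f : Nat → Int) (n : Nat) :
    ((List.range n).map f).sum = ∑ k ∈ Finset.range n, f k := by
  induction n with
  | zero => simp
  | succ n ih =>
      rw [List.range_succ, List.map_append, List.sum_append, Finset.sum_range_succ, ih]; simp

lemma pv_foldl_add_pyRange (g : Int → Int) (a b init : Int) :
    (PySem.List.pyRange a b).foldl (fun s i => s + g i) init
      = init + ∑ k ∈ Finset.range (b - a).toNat, g (a + ↑k) := by
  rw [PySem.List.pyRange_one, List.foldl_map, PySem.List.foldl_add, pv_sum_map_range_int]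

lemma pv_sum_shift_int (g : Nat → Int) {a b : Nat} (h : a ≤ b) :
    ∑ k ∈ Finset.range (b - a), g (a + k)
      = ∑ i ∈ Finset.range b, g i - ∑ i ∈ Finset.range a, g i := by
  rw [← Finset.sum_Ico_eq_sum_range, Finset.sum_Ico_eq_sub _ h]

lemma pv_sum_shift_int' (g : Nat → Int) {a b : Nat} (h : a ≤ b) (G : Int → Int)
    (hG : ∀ k : Nat, G ((↑a : Int) + ↑k) = g (a + k)) :
    ∑ k ∈ Finset.range (b - a), G ((↑a : Int) + ↑k)
      = ∑ i ∈ Finset.range b, g i - ∑ i ∈ Finset.range a, g i := by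
  rw [Finset.sum_congr rfl (fun k _ => hG k), pv_sum_shift_int g h]

-- A's innermost double loop in closed form
lemma pv_sumA_closed (m : List (List Int)) (p q r s : Nat) (hp : p ≤ q + 1) (hr : r ≤ s + 1) :
    (PySem.List.pyRange (↑p) ((↑q : Int) + 1)).foldl (fun acc h =>
      (PySem.List.pyRange (↑r) ((↑s : Int) + 1)).foldl (fun acc w =>
        acc + PySem.List.pyGetD (PySem.List.pyGetD m h []) w 0) acc) 0
    = pvS m (q + 1) (s + 1) - pvS m p (s + 1) - pvS m (q + 1) r + pvS m p r := by
  have hin : ∀ (acc h : Int),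
      (PySem.List.pyRange (↑r) ((↑s : Int) + 1)).foldl (fun acc w =>
        acc + PySem.List.pyGetD (PySem.List.pyGetD m h []) w 0) acc
      = acc + (pvRowPref (PySem.List.pyGetD m h []) (s + 1)
                - pvRowPref (PySem.List.pyGetD m h []) r) := by
    intro acc h
    rw [pv_foldl_add_pyRange]
    have ht : ((↑s : Int) + 1 - ↑r).toNat = s + 1 - r := by omega
    rw [ht]
    congr 1
    unfold pvRowPref
    exact pv_sum_shift_int' (fun w => PySem.List.pyGetD (PySem.List.pyGetD m h []) (↑w) 0) hr
      (fun w => PySem.List.pyGetD (PySem.List.pyGetD m h []) w 0) (fun k => by norm_cast)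
  rw [List.foldl_ext _ (fun acc h =>
        acc + (pvRowPref (PySem.List.pyGetD m h []) (s + 1)
                - pvRowPref (PySem.List.pyGetD m h []) r)) 0
        (fun acc h _ => hin acc h)]
  rw [pv_foldl_add_pyRange]
  have ht : ((↑q : Int) + 1 - ↑p).toNat = q + 1 - p := by omega
  rw [ht]
  rw [pv_sum_shift_int' (fun h => pvRowPref (PySem.List.pyGetD m (↑h) []) (s + 1)
        - pvRowPref (PySem.List.pyGetD m (↑h) []) r) hp
      (fun h => pvRowPref (PySem.List.pyGetD m h []) (s + 1)
        - pvRowPref (PySem.List.pyGetD m h []) r) (fun k => by norm_cast)]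
  rw [Finset.sum_sub_distrib, Finset.sum_sub_distrib]
  unfold pvS
  ring

-- Source B's inner column loop, for any prev row
lemma pv_build_inner (row prev : List Int) (t : Nat) :
    (PySem.List.pyRange 0 (↑t : Int)).foldl (fun cs j =>
      let s := cs.2 + PySem.List.pyGetD row j 0
      (cs.1 ++ [PySem.List.pyGetD prev (j + 1) 0 + s], s)) ([(0 : Int)], (0 : Int))
    = ([(0 : Int)] ++ (List.range t).map
        (fun (j : Nat) => PySem.List.pyGetD prev ((↑j : Int) + 1) 0 + pvRowPref row (j + 1)),
       pvRowPref row t) := by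
  induction t with
  | zero => simp [pvRowPref]
  | succ t ih =>
      have hcast : ((↑(t + 1) : Int)) = (↑t : Int) + 1 := by push_cast; ring
      rw [hcast, PySem.List.pyRange_one_succ_right (by positivity), List.foldl_append, ih]
      simp only [List.foldl_cons, List.foldl_nil]
      simp only [Prod.mk.injEq]
      constructor
      · rw [List.range_succ, List.map_append]
        simp [pvRowPref, Finset.sum_range_succ]
      · simp [pvRowPref, Finset.sum_range_succ]

lemma pv_cons_map_range {α : Type} (f : Nat → α) (n : Nat) :
    f 0 :: (List.range n).map (fun i => f (i + 1)) = (List.range (n + 1)).map f := by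
  rw [List.range_succ_eq_map, List.map_cons, List.map_map]
  simp [Function.comp, Nat.succ_eq_add_one]

lemma pv_srow_congr (m : List (List Int)) (n a b : Nat) (h : a = b) :
    (List.range (n + 1)).map (fun x => pvS m a x)
      = (List.range (n + 1)).map (fun x => pvS m b x) := by rw [h]

-- one step of Source B's row loop advances the S-row
lemma pv_build_step (m : List (List Int)) (n y : Nat) (r : List Int)
    (hr : PySem.List.pyGetD m (↑y) [] = r) :
    [(0 : Int)] ++ (List.range n).map
      (fun (j : Nat) => PySem.List.pyGetD ((List.range (n + 1)).map (fun x => pvS m y x)) ((↑j : Int) + 1) 0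
                 + pvRowPref r (j + 1))
    = (List.range (n + 1)).map (fun x => pvS m (y + 1) x) := by
  rw [← pv_cons_map_range (fun x => pvS m (y + 1) x) n, List.singleton_append]
  have h0 : pvS m (y + 1) 0 = 0 := by simp [pvS, pvRowPref]
  rw [h0]
  refine congrArg ((0 : Int) :: ·) ?_
  apply List.map_congr_left
  intro j hj
  have hjn : j < n := List.mem_range.mp hj
  have hcast : ((↑j : Int) + 1) = ((↑(j + 1) : Nat) : Int) := by push_cast; ring
  rw [hcast, PySem.List.pyGetD_natCast, PySem.List.getD_map_range _ _ _ _ (by omega)]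
  show pvS m y (j + 1) + pvRowPref r (j + 1) = pvS m (y + 1) (j + 1)
  rw [pvS, pvS, Finset.sum_range_succ, hr]

-- Source B's row loop, generalized over the already-built prefix rows
lemma pv_build_go (m : List (List Int)) (n : Nat) :
    ∀ (rows : List (List Int)) (y : Nat), rows = m.drop y →
    ∀ (acc : List (List Int)),
    (rows.foldl (fun st row =>
      let cur := (PySem.List.pyRange 0 (↑n : Int)).foldl (fun cs j =>
        let s := cs.2 + PySem.List.pyGetD row j 0
        (cs.1 ++ [PySem.List.pyGetD st.2 (j + 1) 0 + s], s)) ([(0 : Int)], (0 : Int))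
      (st.1 ++ [cur.1], cur.1))
      (acc, (List.range (n + 1)).map (fun x => pvS m y x)))
    = (acc ++ (List.range rows.length).map
          (fun i => (List.range (n + 1)).map (fun x => pvS m (y + 1 + i) x)),
       (List.range (n + 1)).map (fun x => pvS m (y + rows.length) x)) := by
  intro rows
  induction rows with
  | nil => intro y _ acc; simp
  | cons r rs ih =>
      intro y hdrop acc
      have hy : m[y]? = some r := by
        have : (m.drop y)[0]? = some r := by rw [← hdrop]; rfl
        rwa [List.getElem?_drop, Nat.add_zero] at this
      have hget : PySem.List.pyGetD m (↑y) [] = r := by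
        rw [PySem.List.pyGetD_natCast, List.getD_eq_getElem?_getD, hy]; rfl
      have hdrop' : rs = m.drop (y + 1) := by
        have : m.drop (y + 1) = (m.drop y).drop 1 := by
          rw [List.drop_drop]
        rw [this, ← hdrop]; rfl
      rw [List.foldl_cons]
      simp only [pv_build_inner r _ n]
      rw [pv_build_step m n y r hget, ih (y + 1) hdrop']
      simp only [Prod.mk.injEq]
      constructor
      · rw [List.length_cons,
            ← pv_cons_map_range (fun i => (List.range (n + 1)).map (fun x => pvS m (y + 1 + i) x))
              rs.length]
        rw [List.append_assoc, List.singleton_append]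
        refine congrArg (acc ++ ·) ?_
        rw [pv_srow_congr m n (y + 1) (y + 1 + 0) (by omega)]
        refine congrArg _ ?_
        apply List.map_congr_left
        intro i _
        exact pv_srow_congr m n (y + 1 + 1 + i) (y + 1 + (i + 1)) (by omega)
      · exact pv_srow_congr m n (y + 1 + rs.length) (y + (rs.length + 1)) (by omega)

-- the built table is the map of pvS
lemma pv_build_pre (m : List (List Int)) (n : Nat) :
    (pvBuildPre m (↑n : Int)).1
      = (List.range (m.length + 1)).map
          (fun y => (List.range (n + 1)).map (fun x => pvS m y x)) := by
  have hrep : List.replicate (((↑n : Int) + 1).toNat) (0 : Int)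
      = (List.range (n + 1)).map (fun x => pvS m 0 x) := by
    have : ((↑n : Int) + 1).toNat = n + 1 := by omega
    rw [this]
    have : (fun x => pvS m 0 x) = fun _ => (0 : Int) := by
      funext x; simp [pvS]
    rw [this, List.map_const', List.length_range]
  unfold pvBuildPre
  rw [hrep]
  have := pv_build_go m n m 0 (by simp) [(List.range (n + 1)).map (fun x => pvS m 0 x)]
  rw [this]
  rw [← pv_cons_map_range (fun y => (List.range (n + 1)).map (fun x => pvS m y x)) m.length]
  rw [List.singleton_append]
  refine congrArg₂ (· :: ·) rfl ?_
  apply List.map_congr_left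
  intro i _
  exact pv_srow_congr m n (0 + 1 + i) (i + 1) (by omega)

-- lookup in the built table
lemma pv_idx2_pre (m : List (List Int)) (n y x : Nat) (hy : y ≤ m.length) (hx : x ≤ n) :
    pvIdx2 ((pvBuildPre m (↑n : Int)).1) (↑y) (↑x) = pvS m y x := by
  rw [pv_build_pre, pvIdx2]
  rw [PySem.List.pyGetD_natCast _ y, PySem.List.getD_map_range _ _ _ _ (show y < m.length + 1 by omega)]
  rw [PySem.List.pyGetD_natCast _ x, PySem.List.getD_map_range _ _ _ _ (show x < n + 1 by omega)]

-- ===== VERDICT (by name: the statement is the Claim_ definition above) =====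
theorem maxSumSubRect2_spec : Claim_equal_maxSumSubRect2 := by
  intro matrix k _ _
  unfold Spec_maxSumSubRect2 maxSumSubRect2 maxSumSubRect2_alt
  simp only []
  set colcN := (PySem.List.pyGetD matrix 0 []).length with hcolc
  apply PySem.List.foldl_congr_mem
  intro st1 y1 hy1
  apply PySem.List.foldl_congr_mem
  intro st2 x1 hx1
  apply PySem.List.foldl_congr_mem
  intro st3 y2 hy2
  apply PySem.List.foldl_congr_mem
  intro st4 x2 hx2
  obtain ⟨hy1l, hy1u⟩ := (PySem.List.mem_pyRange_one).mp hy1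
  obtain ⟨hx1l, hx1u⟩ := (PySem.List.mem_pyRange_one).mp hx1
  obtain ⟨hy2l, hy2u⟩ := (PySem.List.mem_pyRange_one).mp hy2
  obtain ⟨hx2l, hx2u⟩ := (PySem.List.mem_pyRange_one).mp hx2
  have hq : y1 = ((y1.toNat : Nat) : Int) := by omega
  have hp : y2 = ((y2.toNat : Nat) : Int) := by omega
  have hs : x1 = ((x1.toNat : Nat) : Int) := by omega
  have hr : x2 = ((x2.toNat : Nat) : Int) := by omega
  set q := y1.toNat; set p := y2.toNat; set s := x1.toNat; set r := x2.toNat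
  have hpq : p ≤ q + 1 := by omega
  have hrs : r ≤ s + 1 := by omega
  have hql : q + 1 ≤ matrix.length := by omega
  have hsl : s + 1 ≤ colcN := by omega
  have hsum :
      (PySem.List.pyRange y2 (y1 + 1)).foldl (fun sacc h =>
        (PySem.List.pyRange x2 (x1 + 1)).foldl (fun sacc w =>
          sacc + PySem.List.pyGetD (PySem.List.pyGetD matrix h []) w 0) sacc) 0
      = pvIdx2 ((pvBuildPre matrix (↑colcN : Int)).1) (y1 + 1) (x1 + 1)
        - pvIdx2 ((pvBuildPre matrix (↑colcN : Int)).1) y2 (x1 + 1)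
        - pvIdx2 ((pvBuildPre matrix (↑colcN : Int)).1) (y1 + 1) x2
        + pvIdx2 ((pvBuildPre matrix (↑colcN : Int)).1) y2 x2 := by
    rw [hq, hp, hs, hr]
    have e1 : ((q : Int) + 1) = ((q + 1 : Nat) : Int) := by push_cast; ring
    have e2 : ((s : Int) + 1) = ((s + 1 : Nat) : Int) := by push_cast; ring
    rw [pv_sumA_closed matrix p q r s hpq hrs, e1, e2,
        pv_idx2_pre matrix colcN (q + 1) (s + 1) hql hsl,
        pv_idx2_pre matrix colcN p (s + 1) (by omega) hsl,
        pv_idx2_pre matrix colcN (q + 1) r hql (by omega),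
        pv_idx2_pre matrix colcN p r (by omega) (by omega)]
  rw [hsum]
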